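-- pv_equiv track=rewrite | github.com/syurskyi/Algorithms_and_Data_Structure | _algorithms_challenges/projecteuler/ProjectEuler-master(2)/ProjectEuler-master/300.py | __get_contact
-- ===== SOURCE A (Python) =====
-- def __get_contact(folding):
--     rv = []
--     n = len(folding)
--     for i in range(n):
--         for j in range(i + 1, n):
--             distance = abs(folding[i][0] - folding[j][0]) + abs(folding[i][1] - folding[j][1])
--             if distance == 1:
--                 rv.append(2**i + 2**j)
--     return sorted(rv)
-- ===== SOURCE B (Python) =====
-- def __get_contact(folding):
--     # Index points by coordinate, then look up only the 4 grid neighbors of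
--     # each point instead of scanning all later points.
--     pos = {}
--     for i, p in enumerate(folding):
--         pos.setdefault(p, []).append(i)
--     rv = []
--     for i, (x, y) in enumerate(folding):
--         for q in ((x + 1, y), (x - 1, y), (x, y + 1), (x, y - 1)):
--             for j in pos.get(q, ()):
--                 if j > i:
--                     rv.append(2 ** i + 2 ** j)
--     return sorted(rv)
-- ===== Notes on version B (the rewrite author's own statement) =====
-- stated objective: faster
-- what changed: Replaces A's all-pairs O(n^2) Manhattan-distance scan with a dictionary mapping each coordinate to its point indices, so each point only probes its 4 grid neighbor coordinates.
import Mathlib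
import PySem

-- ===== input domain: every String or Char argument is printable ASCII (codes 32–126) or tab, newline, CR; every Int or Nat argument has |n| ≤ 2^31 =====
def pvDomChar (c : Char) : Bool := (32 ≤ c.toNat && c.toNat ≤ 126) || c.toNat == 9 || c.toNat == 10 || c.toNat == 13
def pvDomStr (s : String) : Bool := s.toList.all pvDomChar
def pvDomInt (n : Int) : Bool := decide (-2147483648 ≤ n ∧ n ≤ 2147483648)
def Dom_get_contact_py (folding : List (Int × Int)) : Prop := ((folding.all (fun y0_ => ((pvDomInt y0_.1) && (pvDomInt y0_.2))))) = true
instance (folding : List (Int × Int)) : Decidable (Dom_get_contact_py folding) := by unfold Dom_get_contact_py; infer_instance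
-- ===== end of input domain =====

-- B replaces A's all-pairs distance scan by a coordinate→indices dictionary with 4 neighbor probes per point (faster).

-- ===== PORT A =====
def get_contact_py (folding : List (Int × Int)) : List Int :=
  let n : Int := folding.length
  let rv : List Int :=
    (PySem.List.pyRange 0 n 1).foldl (fun rv i =>
      (PySem.List.pyRange (i + 1) n 1).foldl (fun rv j =>
        -- folding[i], folding[j]: 0 ≤ i < j < n, so pyGetD is exact here
        let pi := PySem.List.pyGetD folding i (0, 0)
        let pj := PySem.List.pyGetD folding j (0, 0)
        let distance := |pi.1 - pj.1| + |pi.2 - pj.2|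
        if distance = 1 then rv ++ [(2 : Int) ^ i.toNat + 2 ^ j.toNat]  -- 2**i + 2**j, 0 ≤ i, j
        else rv) rv) []
  PySem.List.sorted rv (fun x => x) false

-- ===== PORT B =====
def get_contact_py_alt (folding : List (Int × Int)) : List Int :=
  -- pos.setdefault(p, []).append(i): its net effect on the dict is pos[p] = pos.get(p, []) + [i], i.e. Dict.modify
  let pos : PySem.Dict (Int × Int) (List Int) :=
    (PySem.List.enumerate folding).foldl
      (fun d ip => d.modify ip.2 [] (fun l => l ++ [ip.1])) PySem.Dict.empty
  let rv : List Int :=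
    (PySem.List.enumerate folding).foldl (fun rv ip =>
      [(ip.2.1 + 1, ip.2.2), (ip.2.1 - 1, ip.2.2), (ip.2.1, ip.2.2 + 1), (ip.2.1, ip.2.2 - 1)].foldl
        (fun rv q =>
          (pos.getD q []).foldl (fun rv j =>
            if ip.1 < j then rv ++ [(2 : Int) ^ ip.1.toNat + 2 ^ j.toNat] else rv) rv) rv) []
  PySem.List.sorted rv (fun x => x) false

-- ===== PRECONDITION & SPEC =====
def Spec_get_contact_py (folding : List (Int × Int)) (out : List Int) : Prop := out = get_contact_py_alt folding
instance (folding : List (Int × Int)) (out : List Int) : Decidable (Spec_get_contact_py folding out) := by unfold Spec_get_contact_py; infer_instance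

-- ===== CLAIM (what is proved, stated in full; the proofs are below) =====
def Claim_equal_get_contact_py : Prop := ∀ (folding : List (Int × Int)), Dom_get_contact_py folding → Spec_get_contact_py folding (get_contact_py folding)

-- ===== LEMMAS AND PROOFS =====

-- the 4 grid neighbors of a coordinate (B's probe list)
def pvNbrs (p : Int × Int) : List (Int × Int) :=
  [(p.1 + 1, p.2), (p.1 - 1, p.2), (p.1, p.2 + 1), (p.1, p.2 - 1)]

-- indices of the points equal to q, in increasing order (= what B's dict stores at q)
def pvIdx (folding : List (Int × Int)) (q : Int × Int) : List Int :=
  ((PySem.List.enumerate folding).filter (fun ip => ip.2 == q)).map (fun ip => ip.1)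

def pvEnc (i j : Int) : Int := (2 : Int) ^ i.toNat + 2 ^ j.toNat

-- A's inner loop for a fixed i, as a list
def pvArow (folding : List (Int × Int)) (i : Int) : List Int :=
  ((PySem.List.pyRange (i + 1) (folding.length : Int) 1).filter
      (fun j => decide (|(PySem.List.pyGetD folding i (0, 0)).1 - (PySem.List.pyGetD folding j (0, 0)).1| +
                        |(PySem.List.pyGetD folding i (0, 0)).2 - (PySem.List.pyGetD folding j (0, 0)).2| = 1))).map
    (pvEnc i)

-- B's inner loops for a fixed i, as a list
def pvBrow (folding : List (Int × Int)) (i : Int) : List Int :=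
  (pvNbrs (PySem.List.pyGetD folding i (0, 0))).flatMap
    (fun q => ((pvIdx folding q).filter (fun j => decide (i < j))).map (pvEnc i))

theorem pvA_eq (folding : List (Int × Int)) :
    get_contact_py folding =
      PySem.List.sorted ((PySem.List.pyRange 0 (folding.length : Int) 1).flatMap (pvArow folding)) (fun x => x) false := by
  unfold get_contact_py
  dsimp only
  congr 1
  rw [PySem.List.foldl_congr_mem _ _ (fun rv i => rv ++ pvArow folding i) _
    (fun acc i _ => by
      unfold pvArow
      exact PySem.List.foldl_append_ite
        (fun j => |(PySem.List.pyGetD folding i (0, 0)).1 - (PySem.List.pyGetD folding j (0, 0)).1| +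
                  |(PySem.List.pyGetD folding i (0, 0)).2 - (PySem.List.pyGetD folding j (0, 0)).2| = 1)
        (pvEnc i) _ _)]
  rw [PySem.List.foldl_append_eq_flatMap]
  simp

theorem pvPosD (folding : List (Int × Int)) (q : Int × Int) :
    ((PySem.List.enumerate folding).foldl
      (fun d ip => d.modify ip.2 [] (fun l => l ++ [ip.1])) PySem.Dict.empty).getD q [] = pvIdx folding q := by
  have h : (PySem.List.enumerate folding).foldl
      (fun d ip => d.modify ip.2 [] (fun l => l ++ [ip.1])) PySem.Dict.empty
      = ((PySem.List.enumerate folding).map (fun ip => (ip.2, ip.1))).foldl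
        (fun d p => d.modify p.1 [] (fun l => l ++ [p.2])) PySem.Dict.empty := by
    rw [List.foldl_map]
  rw [h, PySem.Dict.getD_foldl_modify_append]
  simp [pvIdx, List.filter_map, Function.comp_def]

theorem pvB_eq (folding : List (Int × Int)) :
    get_contact_py_alt folding =
      PySem.List.sorted ((PySem.List.pyRange 0 (folding.length : Int) 1).flatMap (pvBrow folding)) (fun x => x) false := by
  unfold get_contact_py_alt
  dsimp only
  generalize hpos : ((PySem.List.enumerate folding).foldl
      (fun d ip => d.modify ip.2 [] (fun l => l ++ [ip.1])) PySem.Dict.empty) = pos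
  have hget : ∀ q, pos.getD q [] = pvIdx folding q := fun q => hpos ▸ pvPosD folding q
  congr 1
  rw [PySem.List.enumerate_eq_map_pyRange folding (0, 0), List.foldl_map]
  rw [PySem.List.foldl_congr_mem _ _ (fun rv i => rv ++ pvBrow folding i) _
    (fun acc i _ => by
      rw [PySem.List.foldl_congr_mem _ _
        (fun rv q => rv ++ ((pvIdx folding q).filter (fun j => decide (i < j))).map (pvEnc i)) _
        (fun acc q _ => by
          rw [hget q]
          exact PySem.List.foldl_append_ite (fun j => i < j) (pvEnc i) _ _)]
      rw [PySem.List.foldl_append_eq_flatMap]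
      rfl)]
  rw [PySem.List.foldl_append_eq_flatMap]
  simp [PySem.List.len]

theorem pvEnc_inj {i j j' : Int} (hj : 0 ≤ j) (hj' : 0 ≤ j') (h : pvEnc i j = pvEnc i j') : j = j' := by
  unfold pvEnc at h
  have h2 : (2 : Int) ^ j.toNat = 2 ^ j'.toNat := add_left_cancel h
  have := Int.pow_right_injective (by norm_num) h2
  omega

theorem pvAdj_iff (p r : Int × Int) : (|p.1 - r.1| + |p.2 - r.2| = 1) ↔ r ∈ pvNbrs p := by
  simp only [pvNbrs, List.mem_cons, List.not_mem_nil, or_false, Prod.ext_iff]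
  rcases abs_cases (p.1 - r.1) with ⟨h1, _⟩ | ⟨h1, _⟩ <;>
    rcases abs_cases (p.2 - r.2) with ⟨h2, _⟩ | ⟨h2, _⟩ <;> omega

theorem mem_pvIdx (folding : List (Int × Int)) (q : Int × Int) (j : Int) :
    j ∈ pvIdx folding q ↔ ∃ (k : Nat) (h : k < folding.length), j = (k : Int) ∧ folding[k] = q := by
  simp only [pvIdx, List.mem_map, List.mem_filter, PySem.List.mem_enumerate_iff]
  constructor
  · rintro ⟨ip, ⟨⟨k, hk, rfl⟩, hq⟩, rfl⟩
    exact ⟨k, hk, by simp, by simpa using hq⟩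
  · rintro ⟨k, hk, rfl, hq⟩
    exact ⟨((k : Int), folding[k]), ⟨⟨k, hk, by simp⟩, by simpa using hq⟩, rfl⟩

theorem nodup_pvIdx (folding : List (Int × Int)) (q : Int × Int) : (pvIdx folding q).Nodup := by
  have h1 : ((PySem.List.enumerate folding).filter (fun ip => ip.2 == q)).Pairwise
      (fun p r => p.1 < r.1) := (PySem.List.pairwise_lt_enumerate folding 0).filter _
  have h2 : (pvIdx folding q).Pairwise (· < ·) := by
    unfold pvIdx; exact List.pairwise_map.mpr h1
  exact h2.imp (fun h => Int.ne_of_lt h)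

theorem pvRowPerm (folding : List (Int × Int)) (i : Int) (hi : 0 ≤ i) :
    (pvArow folding i).Perm (pvBrow folding i) := by
  have hjnn : ∀ (q : Int × Int) (j : Int), j ∈ pvIdx folding q → 0 ≤ j := by
    intro q j hm
    rcases (mem_pvIdx folding q j).mp hm with ⟨k, hk, rfl, _⟩
    positivity
  -- Nodup of A's row
  have ndA : (pvArow folding i).Nodup := by
    refine List.Nodup.map_on ?_ (((PySem.List.nodup_pyRange_one _ _)).filter _)
    intro j hj j' hj' he
    have h1 := (PySem.List.mem_pyRange_one.mp (List.mem_filter.mp hj).1).1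
    have h2 := (PySem.List.mem_pyRange_one.mp (List.mem_filter.mp hj').1).1
    exact pvEnc_inj (by omega) (by omega) he
  -- Nodup of B's row
  have ndB : (pvBrow folding i).Nodup := by
    unfold pvBrow
    rw [List.nodup_flatMap]
    constructor
    · intro q _
      refine List.Nodup.map_on ?_ ((nodup_pvIdx folding q).filter _)
      intro j hj j' hj' he
      exact pvEnc_inj (hjnn q j (List.mem_filter.mp hj).1) (hjnn q j' (List.mem_filter.mp hj').1) he
    · have hne : (pvNbrs (PySem.List.pyGetD folding i (0, 0))).Pairwise (· ≠ ·) := by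
        simp only [pvNbrs]
        refine List.Pairwise.cons ?_ (List.Pairwise.cons ?_ (List.Pairwise.cons ?_ (List.pairwise_singleton _ _))) <;>
          simp_all [Prod.ext_iff] <;> omega
      refine hne.imp ?_
      intro q q' hqq v hv hv'
      rcases List.mem_map.mp hv with ⟨j, hj, rfl⟩
      rcases List.mem_map.mp hv' with ⟨j', hj', he⟩
      have hjm := (List.mem_filter.mp hj).1
      have hj'm := (List.mem_filter.mp hj').1
      have : j' = j := pvEnc_inj (hjnn q' j' hj'm) (hjnn q j hjm) he
      subst this
      rcases (mem_pvIdx folding q j').mp hjm with ⟨k, hk, hjk, hfq⟩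
      rcases (mem_pvIdx folding q' j').mp hj'm with ⟨k', hk', hjk', hfq'⟩
      have : k = k' := by omega
      subst this
      exact hqq (hfq ▸ hfq' ▸ rfl)
  rw [List.perm_ext_iff_of_nodup ndA ndB]
  intro v
  simp only [pvArow, pvBrow, List.mem_map, List.mem_filter, List.mem_flatMap,
    PySem.List.mem_pyRange_one, decide_eq_true_eq]
  constructor
  · rintro ⟨j, ⟨⟨hj1, hj2⟩, hadj⟩, rfl⟩
    have h0j : (0 : Int) ≤ j := by omega
    have hjr : PySem.List.pyGetD folding j (0, 0) = folding[j.toNat] :=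
      PySem.List.pyGetD_eq_getElem folding (0, 0) h0j hj2
    have hmem : j ∈ pvIdx folding (folding[j.toNat]) :=
      (mem_pvIdx folding (folding[j.toNat]) j).mpr ⟨j.toNat, by omega, by omega, rfl⟩
    exact ⟨folding[j.toNat], (pvAdj_iff _ _).mp (by rw [← hjr]; exact hadj),
      ⟨j, ⟨hmem, by omega⟩, rfl⟩⟩
  · rintro ⟨q, hq, j, ⟨hjm, hij⟩, rfl⟩
    rcases (mem_pvIdx folding q j).mp hjm with ⟨k, hk, hjk, hfq⟩
    subst hjk
    have hjr : PySem.List.pyGetD folding (k : Int) (0, 0) = folding[k] := by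
      rw [PySem.List.pyGetD_eq_getElem folding (0, 0) (by positivity) (by exact_mod_cast hk)]
      simp
    refine ⟨(k : Int), ⟨⟨by omega, by exact_mod_cast hk⟩, ?_⟩, rfl⟩
    rw [hjr, hfq]
    exact (pvAdj_iff _ _).mpr hq

-- ===== VERDICT (by name: the statement is the Claim_ definition above) =====
theorem get_contact_py_spec : Claim_equal_get_contact_py := by
  intro folding _
  unfold Spec_get_contact_py
  rw [pvA_eq, pvB_eq]
  exact PySem.List.sorted_eq_sorted_of_perm _ _ _ (fun a b h => h)
    (List.Perm.flatMap_left _ (fun i hi => pvRowPerm folding i ((PySem.List.mem_pyRange_one.mp hi).1)))
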